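-- pv_equiv track=rewrite | github.com/devYaksha/Travelling-Salesman-Problem | Genetic-Algorithms/H-CFS_PCV/PCV.py | melhor_individuo
-- ===== SOURCE A (Python) =====
-- def melhor_individuo(vetor_fitness, populacao):
--    melhor_fitness = vetor_fitness[0]
--    pior_fitness = melhor_fitness
--    pior_cromossomo = populacao[0]
--    melhor_cromossomo = populacao[0]
--
--    for i in range(len(vetor_fitness)):
--       if vetor_fitness[i] < melhor_fitness:
--           melhor_fitness = vetor_fitness[i]
--           melhor_cromossomo = populacao[i]
--
--       if vetor_fitness[i] > pior_fitness:
--           pior_fitness = vetor_fitness[i]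
--           pior_cromossomo = populacao[i]
--
--    return melhor_fitness, melhor_cromossomo, pior_fitness, pior_cromossomo
-- ===== SOURCE B (Python) =====
-- def melhor_individuo(vetor_fitness, populacao):
--     melhor = min(vetor_fitness)
--     pior = max(vetor_fitness)
--     return (melhor, populacao[vetor_fitness.index(melhor)],
--             pior, populacao[vetor_fitness.index(pior)])
-- ===== Notes on version B (the rewrite author's own statement) =====
-- stated objective: idiomatic
-- what changed: Replaces A's single index loop maintaining four running variables by the idiomatic min()/max() builtins plus list.index to fetch the first-extremal chromosome; strict </> in A means it keeps the first extremum, which min/max/index reproduce exactly.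
import Mathlib
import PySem

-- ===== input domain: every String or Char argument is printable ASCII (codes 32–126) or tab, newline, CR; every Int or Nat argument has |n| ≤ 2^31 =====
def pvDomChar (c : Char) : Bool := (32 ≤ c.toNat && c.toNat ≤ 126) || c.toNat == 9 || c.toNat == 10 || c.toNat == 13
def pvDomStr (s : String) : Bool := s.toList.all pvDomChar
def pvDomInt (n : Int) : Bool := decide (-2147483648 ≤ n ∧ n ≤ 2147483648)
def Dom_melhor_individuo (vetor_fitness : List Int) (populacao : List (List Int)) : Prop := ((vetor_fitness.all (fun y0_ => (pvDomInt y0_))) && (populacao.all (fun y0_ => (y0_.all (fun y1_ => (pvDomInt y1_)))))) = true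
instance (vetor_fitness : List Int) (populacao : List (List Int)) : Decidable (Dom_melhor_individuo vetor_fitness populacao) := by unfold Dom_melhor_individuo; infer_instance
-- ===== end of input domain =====

-- B replaces A's four-variable index loop by min()/max() plus list.index (first extremal), an idiomatic decomposition of the same O(n) task.

-- ===== PORT A =====
def melhor_individuo (vetor_fitness : List Int) (populacao : List (List Int)) : Int × List Int × Int × List Int :=
  let melhor_fitness := PySem.List.pyGetD vetor_fitness 0 0
  let pior_fitness := melhor_fitness
  let pior_cromossomo := PySem.List.pyGetD populacao 0 []
  let melhor_cromossomo := PySem.List.pyGetD populacao 0 []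
  (PySem.List.pyRange 0 (vetor_fitness.length : Int) 1).foldl
    (fun (st : Int × List Int × Int × List Int) i =>
      let v := PySem.List.pyGetD vetor_fitness i 0
      let b := if v < st.1 then (v, PySem.List.pyGetD populacao i ([] : List Int)) else (st.1, st.2.1)
      let w := if v > st.2.2.1 then (v, PySem.List.pyGetD populacao i ([] : List Int)) else (st.2.2.1, st.2.2.2)
      (b.1, b.2, w.1, w.2))
    (melhor_fitness, melhor_cromossomo, pior_fitness, pior_cromossomo)

-- ===== PORT B =====
def melhor_individuo_alt (vetor_fitness : List Int) (populacao : List (List Int)) : Int × List Int × Int × List Int :=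
  let melhor := (PySem.List.min? vetor_fitness (fun x => x)).getD 0
  let pior := (PySem.List.max? vetor_fitness (fun x => x)).getD 0
  (melhor,
   PySem.List.pyGetD populacao (((PySem.List.index? vetor_fitness melhor).getD 0 : Nat) : Int) [],
   pior,
   PySem.List.pyGetD populacao (((PySem.List.index? vetor_fitness pior).getD 0 : Nat) : Int) [])

-- ===== PRECONDITION & SPEC =====
-- Pre_ is exactly where A returns: a nonempty fitness vector whose minimum and maximum are both
-- attained within the first populacao.length positions; elsewhere A raises IndexError (B raises
-- ValueError on the empty vector, IndexError otherwise).
def Pre_melhor_individuo (vetor_fitness : List Int) (populacao : List (List Int)) : Prop :=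
  vetor_fitness ≠ [] ∧
    (∀ x ∈ vetor_fitness, ∃ y ∈ vetor_fitness.take populacao.length, y ≤ x) ∧
    (∀ x ∈ vetor_fitness, ∃ y ∈ vetor_fitness.take populacao.length, x ≤ y)
instance (vetor_fitness : List Int) (populacao : List (List Int)) : Decidable (Pre_melhor_individuo vetor_fitness populacao) := by unfold Pre_melhor_individuo; infer_instance

def pvWitness_melhor_individuo : List Int × List (List Int) := ([2, 1, 3], [[7], [8], [9]])

def Spec_melhor_individuo (vetor_fitness : List Int) (populacao : List (List Int)) (out : Int × List Int × Int × List Int) : Prop := out = melhor_individuo_alt vetor_fitness populacao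
instance (vetor_fitness : List Int) (populacao : List (List Int)) (out : Int × List Int × Int × List Int) : Decidable (Spec_melhor_individuo vetor_fitness populacao out) := by unfold Spec_melhor_individuo; infer_instance

-- ===== CLAIM (what is proved, stated in full; the proofs are below) =====
def Claim_equal_melhor_individuo : Prop := ∀ (vetor_fitness : List Int) (populacao : List (List Int)), Dom_melhor_individuo vetor_fitness populacao → Pre_melhor_individuo vetor_fitness populacao → Spec_melhor_individuo vetor_fitness populacao (melhor_individuo vetor_fitness populacao)

-- ===== LEMMAS AND PROOFS =====

-- one step of A's loop body, reading value v and chromosome c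
def pvUpd (st : Int × List Int × Int × List Int) (v : Int) (c : List Int) : Int × List Int × Int × List Int :=
  let b := if v < st.1 then (v, c) else (st.1, st.2.1)
  let w := if v > st.2.2.1 then (v, c) else (st.2.2.1, st.2.2.2)
  (b.1, b.2, w.1, w.2)

lemma melhor_individuo_eq_fold (vf : List Int) (pop : List (List Int)) :
    melhor_individuo vf pop =
      (PySem.List.pyRange 0 (vf.length : Int) 1).foldl
        (fun st i => pvUpd st (PySem.List.pyGetD vf i 0) (PySem.List.pyGetD pop i []))
        (PySem.List.pyGetD vf 0 0, PySem.List.pyGetD pop 0 [],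
         PySem.List.pyGetD vf 0 0, PySem.List.pyGetD pop 0 []) := rfl

lemma pyGetD_append_left (vf : List Int) (v : Int) (i : Int) (h0 : 0 ≤ i) (h1 : i < vf.length) :
    PySem.List.pyGetD (vf ++ [v]) i 0 = PySem.List.pyGetD vf i 0 := by
  rw [PySem.List.pyGetD_eq_getElem _ _ h0 (by simp; omega),
      PySem.List.pyGetD_eq_getElem _ _ h0 (by omega)]
  exact List.getElem_append_left (by omega)

-- A's loop state after vf ++ [v] is one more pvUpd step applied to its state after vf.
lemma A_append (vf : List Int) (v : Int) (pop : List (List Int)) (h : vf ≠ []) :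
    melhor_individuo (vf ++ [v]) pop =
      pvUpd (melhor_individuo vf pop) v (pop.getD vf.length []) := by
  rw [melhor_individuo_eq_fold, melhor_individuo_eq_fold]
  have hini : PySem.List.pyGetD (vf ++ [v]) 0 0 = PySem.List.pyGetD vf 0 0 :=
    pyGetD_append_left vf v 0 le_rfl (by exact_mod_cast List.length_pos_of_ne_nil h)
  have hlen : (((vf ++ [v]).length : Nat) : Int) = (vf.length : Int) + 1 := by simp
  rw [hlen, PySem.List.pyRange_one_succ_right (by positivity), List.foldl_append, hini]
  have hfold :
      List.foldl (fun st i => pvUpd st (PySem.List.pyGetD (vf ++ [v]) i 0) (PySem.List.pyGetD pop i []))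
        (PySem.List.pyGetD vf 0 0, PySem.List.pyGetD pop 0 [],
         PySem.List.pyGetD vf 0 0, PySem.List.pyGetD pop 0 [])
        (PySem.List.pyRange 0 (vf.length : Int) 1) =
      List.foldl (fun st i => pvUpd st (PySem.List.pyGetD vf i 0) (PySem.List.pyGetD pop i []))
        (PySem.List.pyGetD vf 0 0, PySem.List.pyGetD pop 0 [],
         PySem.List.pyGetD vf 0 0, PySem.List.pyGetD pop 0 [])
        (PySem.List.pyRange 0 (vf.length : Int) 1) := by
    apply PySem.List.foldl_congr_mem
    intro acc x hx
    rw [PySem.List.mem_pyRange_one] at hx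
    rw [pyGetD_append_left vf v x hx.1 (by exact_mod_cast hx.2)]
  rw [hfold]
  have hv : PySem.List.pyGetD (vf ++ [v]) (vf.length : Int) 0 = v := by
    rw [PySem.List.pyGetD_natCast]; simp
  have hp : PySem.List.pyGetD pop (vf.length : Int) ([] : List Int) = pop.getD vf.length [] :=
    PySem.List.pyGetD_natCast pop vf.length []
  simp only [List.foldl_cons, List.foldl_nil, hv, hp]

lemma min?_append_singleton_int (x : Int) (t : List Int) (v : Int) :
    PySem.List.min? ((x :: t) ++ [v]) (fun y => y) = some (min (t.foldl min x) v) := by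
  rw [List.cons_append, PySem.List.min?_id_cons, List.foldl_append]
  simp

lemma max?_append_singleton_int (x : Int) (t : List Int) (v : Int) :
    PySem.List.max? ((x :: t) ++ [v]) (fun y => y) = some (max (t.foldl max x) v) := by
  rw [List.cons_append, PySem.List.max?_id_cons, List.foldl_append]
  simp

-- B after vf ++ [v] is the same pvUpd step applied to B after vf.
lemma B_append (vf : List Int) (v : Int) (pop : List (List Int)) (h : vf ≠ []) :
    melhor_individuo_alt (vf ++ [v]) pop =
      pvUpd (melhor_individuo_alt vf pop) v (pop.getD vf.length []) := by
  obtain ⟨x, t, rfl⟩ : ∃ x t, vf = x :: t := by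
    cases vf with
    | nil => exact absurd rfl h
    | cons a l => exact ⟨a, l, rfl⟩
  have hμ : PySem.List.min? (x :: t) (fun y => y) = some (t.foldl min x) :=
    PySem.List.min?_id_cons x t
  have hM : PySem.List.max? (x :: t) (fun y => y) = some (t.foldl max x) :=
    PySem.List.max?_id_cons x t
  set μ := t.foldl min x with hμdef
  set M := t.foldl max x with hMdef
  unfold melhor_individuo_alt pvUpd
  rw [min?_append_singleton_int, max?_append_singleton_int, hμ, hM]
  simp only [Option.getD_some, ← hμdef, ← hMdef]
  have hpop : PySem.List.pyGetD pop ((t.length : Int) + 1) [] = pop.getD (t.length + 1) [] := by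
    rw [show ((t.length : Int) + 1) = ((t.length + 1 : Nat) : Int) by push_cast; ring,
        PySem.List.pyGetD_natCast]
  by_cases hlt : v < μ
  · have hmins : min μ v = v := min_eq_right hlt.le
    have hnm : v ∉ (x :: t) := by
      intro hmem
      exact absurd (PySem.List.min?_isMin hμ v hmem) (by omega)
    rw [hmins, PySem.List.index?_append_singleton_self _ v hnm]
    by_cases hgt : v > M
    · have hmaxs : max M v = v := max_eq_right hgt.le
      rw [hmaxs, PySem.List.index?_append_singleton_self _ v hnm]
      simp [hlt, hgt, hpop, List.getD]
    · have hmaxs : max M v = M := max_eq_left (by omega)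
      have hMm : M ∈ (x :: t) := PySem.List.max?_mem hM
      rw [hmaxs, PySem.List.index?_append_of_mem _ hMm]
      simp [hlt, hgt, hpop, List.getD]
  · have hmins : min μ v = μ := min_eq_left (by omega)
    have hμm : μ ∈ (x :: t) := PySem.List.min?_mem hμ
    rw [hmins, PySem.List.index?_append_of_mem _ hμm]
    by_cases hgt : v > M
    · have hmaxs : max M v = v := max_eq_right hgt.le
      have hnM : v ∉ (x :: t) := by
        intro hmem
        exact absurd (PySem.List.max?_isMax hM v hmem) (by omega)
      rw [hmaxs, PySem.List.index?_append_singleton_self _ v hnM]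
      simp [hlt, hgt, hpop, List.getD]
    · have hmaxs : max M v = M := max_eq_left (by omega)
      have hMm : M ∈ (x :: t) := PySem.List.max?_mem hM
      rw [hmaxs, PySem.List.index?_append_of_mem _ hMm]
      simp [hlt, hgt, List.getD]

lemma eq_single (x : Int) (pop : List (List Int)) :
    melhor_individuo [x] pop = melhor_individuo_alt [x] pop := by
  rw [melhor_individuo_eq_fold]
  have h1 : ((([x] : List Int).length : Nat) : Int) = 0 + 1 := by simp
  rw [h1, PySem.List.pyRange_one_singleton]
  unfold melhor_individuo_alt
  rw [PySem.List.min?_id_cons, PySem.List.max?_id_cons]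
  simp [pvUpd, PySem.List.pyGetD_zero_cons]

lemma melhor_individuo_eq_alt (vf : List Int) (pop : List (List Int)) (h : vf ≠ []) :
    melhor_individuo vf pop = melhor_individuo_alt vf pop := by
  induction vf using List.reverseRecOn with
  | nil => exact absurd rfl h
  | append_singleton l x ih =>
    by_cases hl : l = []
    · subst hl
      simpa using eq_single x pop
    · rw [A_append l x pop hl, B_append l x pop hl, ih hl]

-- ===== VERDICT (by name: the statement is the Claim_ definition above) =====
theorem melhor_individuo_spec : Claim_equal_melhor_individuo := by
  intro vf pop _ hpre
  unfold Spec_melhor_individuo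
  exact melhor_individuo_eq_alt vf pop hpre.1
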